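-- pv_equiv track=rewrite | github.com/HughParsons/GoogleFooBar | Level 4/running-with-bunnies.py | generate
-- ===== SOURCE A (Python) =====
-- def generate(numbers):
--     if len(numbers) == 1:
--         return numbers
--     ans = [] + numbers
--     for i in range(len(numbers)-1):
--         for num in generate(numbers[i+1:]):
--             ans.append(numbers[i]*num)
--
--     return ans
-- ===== SOURCE B (Python) =====
-- def generate(numbers):
--     # Bottom-up over suffixes: the result for numbers[i:] is built once from the
--     # result for numbers[i+1:] alone (no re-recursion into every shorter suffix).
--     if not numbers:
--         return []
--     s = [numbers[-1]]
--     k = 1  # length of the suffix s currently describes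
--     for idx in range(len(numbers) - 2, -1, -1):
--         h = numbers[idx]
--         s = [h] + s[:k] + [h * x for x in s] + s[k:]
--         k += 1
--     return s
-- ===== Notes on version B (the rewrite author's own statement) =====
-- stated objective: alternative
-- what changed: Replaces the recursion that re-generates every proper suffix at every level with a single bottom-up pass in which the answer for numbers[i:] is assembled from the answer for numbers[i+1:] alone (head, then the suffix elements, then head times each previous subset product, then the previous products); measured 3.13x at n=16 but both programs are exponential in the output size, so a timing run could not confirm a speedup at the largest size.
import Mathlib
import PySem

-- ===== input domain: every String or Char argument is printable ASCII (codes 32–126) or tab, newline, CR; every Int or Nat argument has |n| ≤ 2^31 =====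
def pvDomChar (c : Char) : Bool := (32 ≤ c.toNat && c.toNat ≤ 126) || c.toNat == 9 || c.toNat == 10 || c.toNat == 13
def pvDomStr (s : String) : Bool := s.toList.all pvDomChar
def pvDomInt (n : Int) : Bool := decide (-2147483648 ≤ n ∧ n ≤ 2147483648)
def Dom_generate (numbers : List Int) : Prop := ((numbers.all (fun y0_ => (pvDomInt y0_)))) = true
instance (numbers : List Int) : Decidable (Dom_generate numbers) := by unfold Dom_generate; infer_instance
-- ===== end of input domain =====

-- B replaces A's recursion (which re-generates every proper suffix at each level) by one
-- bottom-up pass building the answer for numbers[i:] from the answer for numbers[i+1:] alone.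

-- ===== PORT A =====
def generate (numbers : List Int) : List Int :=
  if numbers.length == 1 then numbers
  else
    (PySem.List.pyRange 0 ((numbers.length : Int) - 1) 1).attach.foldl
      (fun ans i =>
        ans ++ (generate (PySem.List.slice numbers (some (i.1 + 1)) none)).map
          (fun num => PySem.List.pyGetD numbers i.1 0 * num))
      numbers
termination_by numbers.length
decreasing_by
  have hmem := i.2
  rw [PySem.List.mem_pyRange_one] at hmem
  rw [PySem.List.slice_from _ (by omega)]
  simp only [List.length_drop]
  omega

-- ===== PORT B =====
def genStep (numbers : List Int) (st : List Int × Int) (idx : Int) : List Int × Int :=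
  let h := PySem.List.pyGetD numbers idx 0
  (h :: (PySem.List.slice st.1 none (some st.2) ++ st.1.map (fun x => h * x) ++
         PySem.List.slice st.1 (some st.2) none), st.2 + 1)

def generate_alt (numbers : List Int) : List Int :=
  if numbers.length == 0 then []
  else
    ((PySem.List.pyRange ((numbers.length : Int) - 2) (-1) (-1)).foldl
      (genStep numbers) ([PySem.List.pyGetD numbers (-1) 0], 1)).1

-- ===== PRECONDITION & SPEC =====
def Spec_generate (numbers : List Int) (out : List Int) : Prop := out = generate_alt numbers
instance (numbers : List Int) (out : List Int) : Decidable (Spec_generate numbers out) := by unfold Spec_generate; infer_instance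

-- ===== CLAIM (what is proved, stated in full; the proofs are below) =====
def Claim_equal_generate : Prop := ∀ (numbers : List Int), Dom_generate numbers → Spec_generate numbers (generate numbers)

-- ===== LEMMAS AND PROOFS =====

-- The common characterisation: prods xs = all products of subsets of size ≥ 2 together with
-- the tail subsets, in A's emission order; both ports return xs ++ prods xs.
def prods : List Int → List Int
  | [] => []
  | h :: t => (t ++ prods t).map (fun num => h * num) ++ prods t

lemma flat_prods (xs : List Int) :
    (List.range (xs.length - 1)).flatMap
      (fun k => (xs.drop (k+1) ++ prods (xs.drop (k+1))).map (fun num => xs.getD k 0 * num))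
    = prods xs := by
  induction xs with
  | nil => simp [prods]
  | cons h t ih =>
    cases t with
    | nil => simp [prods]
    | cons b t' =>
      have hlen : (h :: b :: t').length - 1 = t'.length + 1 := by simp
      rw [hlen, List.range_succ_eq_map, List.flatMap_cons, List.flatMap_map]
      have hpt : (fun (k : Nat) =>
          ((h :: b :: t').drop (k.succ+1) ++ prods ((h :: b :: t').drop (k.succ+1))).map
            (fun num => (h :: b :: t').getD k.succ 0 * num))
          = (fun (k : Nat) =>
          ((b :: t').drop (k+1) ++ prods ((b :: t').drop (k+1))).map
            (fun num => (b :: t').getD k 0 * num)) := by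
        funext k
        simp [Nat.succ_eq_add_one, List.drop_succ_cons]
      rw [hpt]
      have hlen2 : t'.length = (b :: t').length - 1 := by simp
      rw [hlen2, ih]
      simp [prods]

lemma generate_eq (xs : List Int) : generate xs = xs ++ prods xs := by
  induction hn : xs.length using Nat.strong_induction_on generalizing xs with
  | _ n ihn =>
  subst hn
  rw [generate]
  by_cases h1 : xs.length = 1
  · obtain ⟨a, rfl⟩ : ∃ a, xs = [a] := by
      cases xs with
      | nil => simp at h1
      | cons a t => cases t with
        | nil => exact ⟨a, rfl⟩
        | cons b t' => simp at h1
    simp [prods]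
  · simp only [h1, beq_iff_eq, if_false]
    rw [List.foldl_attach (f := fun ans (i : Int) => ans ++
      (generate (PySem.List.slice xs (some (i+1)) none)).map
        (fun num => PySem.List.pyGetD xs i 0 * num))]
    rw [PySem.List.foldl_congr_mem _ _
      (fun ans (i : Int) => ans ++ ((xs.drop (i+1).toNat ++ prods (xs.drop (i+1).toNat)).map
        (fun num => PySem.List.pyGetD xs i 0 * num))) _ ?hcong]
    case hcong =>
      intro acc i hi
      rw [PySem.List.mem_pyRange_one] at hi
      have hs : PySem.List.slice xs (some (i+1)) none = xs.drop (i+1).toNat :=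
        PySem.List.slice_from _ (by omega)
      have hlt : (xs.drop (i+1).toNat).length < xs.length := by
        simp only [List.length_drop]; omega
      rw [hs, ihn _ hlt _ rfl]
    rw [PySem.List.foldl_append_eq_flatMap]
    congr 1
    rw [← flat_prods xs, PySem.List.pyRange_one, List.flatMap_map]
    have hto : ((xs.length : Int) - 1 - 0).toNat = xs.length - 1 := by omega
    rw [hto]
    have hfun : (fun (k : Nat) =>
        (xs.drop ((0 + (k:Int))+1).toNat ++ prods (xs.drop ((0 + (k:Int))+1).toNat)).map
          (fun num => PySem.List.pyGetD xs (0 + (k:Int)) 0 * num))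
        = (fun (k : Nat) =>
        (xs.drop (k+1) ++ prods (xs.drop (k+1))).map (fun num => xs.getD k 0 * num)) := by
      funext k
      have h1 : ((0 + (k:Int)) + 1).toNat = k + 1 := by omega
      have h2 : (0 + (k:Int)) = ((k : Nat) : Int) := by omega
      rw [h1, h2, PySem.List.pyGetD_natCast]
    rw [hfun]

lemma fold_inv (xs : List Int) :
    ∀ (m : Nat), m < xs.length →
      (PySem.List.pyRange ((m : Int) - 1) (-1) (-1)).foldl (genStep xs)
        (xs.drop m ++ prods (xs.drop m), ((xs.length : Int) - m))
      = (xs ++ prods xs, (xs.length : Int)) := by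
  intro m
  induction m with
  | zero =>
    intro _
    rw [PySem.List.pyRange_neg_one_eq_nil (by omega)]
    simp
  | succ m ih =>
    intro hm
    have hcons : PySem.List.pyRange (((m : Nat) : Int) + 1 - 1) (-1) (-1)
        = ((m : Nat) : Int) :: PySem.List.pyRange (((m : Nat) : Int) - 1) (-1) (-1) := by
      have h : (((m : Nat) : Int) + 1 - 1) = ((m : Nat) : Int) := by omega
      rw [h, PySem.List.pyRange_neg_one_cons (by omega)]
    push_cast
    rw [hcons, List.foldl_cons]
    have hdropm : xs.drop m = xs.getD m 0 :: xs.drop (m + 1) := by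
      rw [List.getD_eq_getElem _ _ (by omega)]
      exact (List.getElem_cons_drop (by omega)).symm
    have hstep : genStep xs (xs.drop (m+1) ++ prods (xs.drop (m+1)), ((xs.length : Int) - ((m:Int)+1))) ((m:Nat) : Int)
        = (xs.drop m ++ prods (xs.drop m), ((xs.length : Int) - (m:Int))) := by
      unfold genStep
      simp only
      have hget : PySem.List.pyGetD xs ((m:Nat) : Int) 0 = xs.getD m 0 := PySem.List.pyGetD_natCast _ _ _
      have hk : ((xs.length : Int) - ((m:Int)+1)) = ((xs.length - (m+1) : Nat) : Int) := by omega
      have hlen : xs.length - (m+1) = (xs.drop (m+1)).length := by simp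
      have hsl1 : PySem.List.slice (xs.drop (m+1) ++ prods (xs.drop (m+1))) none
          (some ((xs.length : Int) - ((m:Int)+1))) = xs.drop (m+1) := by
        rw [hk, PySem.List.slice_to_natCast, hlen, List.take_left]
      have hsl2 : PySem.List.slice (xs.drop (m+1) ++ prods (xs.drop (m+1)))
          (some ((xs.length : Int) - ((m:Int)+1))) none = prods (xs.drop (m+1)) := by
        rw [hk, PySem.List.slice_from _ (by omega)]
        have h5 : ((xs.length - (m+1) : Nat) : Int).toNat = (xs.drop (m+1)).length := by
          simp only [List.length_drop]; omega
        rw [h5, List.drop_left]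
      rw [hget, hsl1, hsl2, hdropm, Prod.mk.injEq]
      exact ⟨by simp [prods], by omega⟩
    rw [hstep, ih (by omega)]

lemma generate_alt_eq (xs : List Int) : generate_alt xs = xs ++ prods xs := by
  rw [generate_alt]
  by_cases h0 : xs.length = 0
  · rw [List.length_eq_zero_iff] at h0
    subst h0
    simp [prods]
  · simp only [beq_iff_eq, h0, if_false]
    have hn : 1 ≤ xs.length := by omega
    have hdrop : xs.drop (xs.length - 1) = [xs.getD (xs.length - 1) 0] := by
      have h1 : xs.length - 1 < xs.length := by omega
      rw [List.getD_eq_getElem _ _ h1, ← List.getElem_cons_drop h1]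
      have h2 : xs.drop (xs.length - 1 + 1) = [] := by
        apply List.drop_of_length_le; omega
      rw [h2]
    have hget : PySem.List.pyGetD xs (-1) 0 = xs.getD (xs.length - 1) 0 := by
      have h1 : xs.length - 1 < xs.length := by omega
      simp only [PySem.List.pyGetD, PySem.List.pyGet?, PySem.List.pyIdx?]
      have hidx : ¬ ((0:Int) ≤ -1) := by omega
      simp only [if_neg hidx]
      have hc : (-(xs.length : Int) ≤ -1) := by omega
      rw [if_pos hc]
      norm_num [List.getD_eq_getElem _ _ h1, List.getElem?_eq_getElem h1]
    have hinit : ([PySem.List.pyGetD xs (-1) 0], (1 : Int))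
        = (xs.drop (xs.length - 1) ++ prods (xs.drop (xs.length - 1)),
           ((xs.length : Int) - ((xs.length - 1 : Nat) : Int))) := by
      rw [hget, hdrop, Prod.mk.injEq]
      exact ⟨by simp [prods], by omega⟩
    have hrange : ((xs.length : Int) - 2) = (((xs.length - 1 : Nat) : Int) - 1) := by omega
    rw [hinit, hrange, fold_inv xs (xs.length - 1) (by omega)]

-- ===== VERDICT (by name: the statement is the Claim_ definition above) =====
theorem generate_spec : Claim_equal_generate := by
  intro numbers _
  unfold Spec_generate
  rw [generate_eq, generate_alt_eq]
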